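-- pv_equiv track=rewrite | github.com/proleu/crispy_shifty | crispy_shifty/protocols/alignment.py | find_top_alignment_index
-- ===== SOURCE A (Python) =====
-- def find_top_alignment_index(a,b):
--     """
--     Finds the index of top alignment for b in a.
--     Top alignment meaning the alignment where the most entries in b match
--     their currently aligned counterparts in a
--     """
--     top_score = 0
--     top_idx = -1
--     L = len(b)
--
--     for i in range(len(a) - L + 1):
--
--         chunk = a[i:i+L]
--
--         cur_score = 0
--         for b_char, chunk_char in zip(b, chunk):
--             if b_char == chunk_char:
--                 cur_score += 1
--
--         if cur_score > top_score:
--             top_idx = i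
--             top_score = cur_score
--
--     return top_idx
-- ===== SOURCE B (Python) =====
-- def find_top_alignment_index(a, b):
--     """
--     Index of the best alignment of b within a (first offset with the most
--     character matches), -1 if no offset matches any character.
--     Different algorithm: a positions-by-character index of a is built once;
--     each b-position j scans only the positions i of the same character with
--     j <= i < j + number-of-offsets (binary search for the start, early break
--     at the end), voting for offset i - j; one final scan picks the first
--     offset with the maximal positive score.
--     """
--     scores = [0] * (len(a) - len(b) + 1)
--     pos = {}
--     for i, ch in enumerate(a):
--         pos.setdefault(ch, []).append(i)
--     for j, ch in enumerate(b):
--         lst = pos.get(ch, [])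
--         # binary search: first index lo with lst[lo] >= j (lst is sorted)
--         lo, hi = 0, len(lst)
--         while lo < hi:
--             mid = (lo + hi) // 2
--             if lst[mid] < j:
--                 lo = mid + 1
--             else:
--                 hi = mid
--         while lo < len(lst) and lst[lo] - j < len(scores):
--             scores[lst[lo] - j] += 1
--             lo += 1
--     best_score, best_idx = 0, -1
--     for o, s in enumerate(scores):
--         if s > best_score:
--             best_score, best_idx = s, o
--     return best_idx
-- ===== Notes on version B (the rewrite author's own statement) =====
-- stated objective: alternative
-- what changed: Instead of rescanning a length-L window at every offset, B builds a positions-by-character index of a once; each position j of b visits only the same-character positions i with j <= i < j+m (binary search for the start, early break at the end), voting for offset i-j, and one final scan picks the first offset with maximal positive score.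
import Mathlib
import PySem

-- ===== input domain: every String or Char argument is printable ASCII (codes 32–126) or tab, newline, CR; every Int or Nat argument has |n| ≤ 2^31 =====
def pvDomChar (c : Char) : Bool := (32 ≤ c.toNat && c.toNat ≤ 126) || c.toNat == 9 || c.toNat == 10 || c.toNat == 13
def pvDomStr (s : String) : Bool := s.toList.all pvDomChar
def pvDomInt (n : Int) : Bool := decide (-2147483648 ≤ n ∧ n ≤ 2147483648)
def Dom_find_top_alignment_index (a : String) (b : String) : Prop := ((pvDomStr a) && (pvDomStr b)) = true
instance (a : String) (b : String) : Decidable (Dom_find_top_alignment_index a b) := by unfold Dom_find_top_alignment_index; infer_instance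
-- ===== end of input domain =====

-- B replaces A's per-offset window rescan by a positions-by-character index of `a`
-- (each b-position j visits only the same-character positions i in its offset
-- window, voting for offset i - j), then one scan picks the first offset with
-- maximal positive score (objective: alternative).

-- ===== PORT A =====
def find_top_alignment_index (a : String) (b : String) : Int :=
  let L : Int := PySem.Str.len b
  let st := (PySem.List.pyRange 0 (PySem.Str.len a - L + 1) 1).foldl
    (fun (st : Int × Int) i =>
      let chunk := PySem.Str.slice a (some i) (some (i + L))
      let cur := (List.zip b.toList chunk.toList).foldl
        (fun (c : Int) p => if p.1 == p.2 then c + 1 else c) 0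
      if cur > st.1 then (cur, i) else st)
    ((0 : Int), (-1 : Int))      -- (top_score, top_idx)
  st.2

-- ===== PORT B =====
-- B-side helpers: literal ports of B's two hand-written while-loops.
-- pvLB is the binary search `while lo < hi: ...` (lo, hi, mid stay nonnegative in
-- Python, so Nat with Nat division is exact for `(lo + hi) // 2`).
def pvLB (lst : List Int) (j : Int) (lo hi : Nat) : Nat :=
  if lo < hi then
    let mid := (lo + hi) / 2
    if PySem.List.pyGetD lst (mid : Int) 0 < j then pvLB lst j (mid + 1) hi
    else pvLB lst j lo mid
  else lo
termination_by hi - lo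
decreasing_by all_goals omega

-- the vote loop `while lo < len(lst) and lst[lo] - j < len(scores): scores[lst[lo]-j] += 1; lo += 1`
-- (pyGetD/pySetD are Python's indexing; the indices hit are in range exactly as in the Python).
def pvWalk (lst : List Int) (j : Int) (lo : Nat) (s : List Int) : List Int :=
  if lo < lst.length ∧ PySem.List.pyGetD lst (lo : Int) 0 - j < (s.length : Int) then
    pvWalk lst j (lo + 1)
      (PySem.List.pySetD s (PySem.List.pyGetD lst (lo : Int) 0 - j)
        (PySem.List.pyGetD s (PySem.List.pyGetD lst (lo : Int) 0 - j) 0 + 1))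
  else s
termination_by lst.length - lo
decreasing_by omega

def find_top_alignment_index_alt (a : String) (b : String) : Int :=
  let scores0 : List Int := PySem.List.pyRepeat [0] (PySem.Str.len a - PySem.Str.len b + 1)
  let pos : PySem.Dict Char (List Int) :=
    (PySem.List.enumerate a.toList 0).foldl
      (fun d p => d.modify p.2 [] (· ++ [p.1])) PySem.Dict.empty
  let scores := (PySem.List.enumerate b.toList 0).foldl
    (fun s p =>
      let lst := pos.getD p.2 []
      pvWalk lst p.1 (pvLB lst p.1 0 lst.length) s) scores0
  let r := (PySem.List.enumerate scores 0).foldl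
    (fun (st : Int × Int) p => if p.2 > st.1 then (p.2, p.1) else st) ((0 : Int), (-1 : Int))
  r.2

-- ===== PRECONDITION & SPEC =====
def Spec_find_top_alignment_index (a : String) (b : String) (out : Int) : Prop := out = find_top_alignment_index_alt a b
instance (a : String) (b : String) (out : Int) : Decidable (Spec_find_top_alignment_index a b out) := by unfold Spec_find_top_alignment_index; infer_instance

-- ===== CLAIM (what is proved, stated in full; the proofs are below) =====
def Claim_equal_find_top_alignment_index : Prop := ∀ (a : String) (b : String), Dom_find_top_alignment_index a b → Spec_find_top_alignment_index a b (find_top_alignment_index a b)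

-- ===== LEMMAS AND PROOFS =====

-- number of positions at which b matches a when placed at offset k
def pvMatchCnt (as_ bs : List Char) (k : Nat) : Int :=
  ((List.zip bs (as_.drop k)).countP (fun p => p.1 == p.2) : Int)

-- the common first-maximum scan both ports reduce to
def pvScan (C : Nat → Int) (m : Nat) : Int :=
  ((List.range m).foldl
    (fun (st : Int × Int) k => if C k > st.1 then (C k, ((k : Nat) : Int)) else st)
    ((0 : Int), (-1 : Int))).2

theorem pv_zip_take (bs t : List Char) : List.zip bs (t.take bs.length) = List.zip bs t := by
  induction bs generalizing t with
  | nil => simp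
  | cons x xs ih =>
    cases t with
    | nil => simp
    | cons y ys => simpa [List.zip] using ih ys

theorem pv_range_eq (a b : String) :
    PySem.List.pyRange 0 (PySem.Str.len a - PySem.Str.len b + 1) 1
      = (List.range ((a.toList.length + 1) - b.toList.length)).map (fun k => ((k : Nat) : Int)) := by
  have ea : a.toList.length = a.length := String.length_toList
  have eb : b.toList.length = b.length := String.length_toList
  by_cases h : b.toList.length ≤ a.toList.length + 1
  · have : PySem.Str.len a - PySem.Str.len b + 1
        = (((a.toList.length + 1) - b.toList.length : Nat) : Int) := by
      rw [PySem.Str.len_eq, PySem.Str.len_eq]; omega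
    rw [this, PySem.List.pyRange_zero_natCast]
  · have h1 : PySem.Str.len a - PySem.Str.len b + 1 ≤ 0 := by
      rw [PySem.Str.len_eq, PySem.Str.len_eq]; omega
    have h2 : (a.toList.length + 1) - b.toList.length = 0 := by omega
    rw [PySem.List.pyRange_one_eq_nil (by omega), h2]
    simp

theorem pv_A_eq (a b : String) :
    find_top_alignment_index a b =
      pvScan (pvMatchCnt a.toList b.toList) ((a.toList.length + 1) - b.toList.length) := by
  simp only [find_top_alignment_index, pvScan, pv_range_eq, List.foldl_map]
  congr 1
  apply PySem.List.foldl_congr_mem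
  intro st k hk
  simp only [List.mem_range] at hk
  have hchunk : (PySem.Str.slice a (some ((k : Nat) : Int)) (some (((k : Nat) : Int) + PySem.Str.len b))).toList
      = (a.toList.drop k).take b.toList.length := by
    rw [PySem.Str.toList_slice, PySem.Chars.slice_eq_listSlice, PySem.Str.len_eq,
        PySem.List.slice_natCast_add]
  rw [hchunk, pv_zip_take, PySem.List.foldl_count_if]
  simp [pvMatchCnt]

theorem pv_count_pos (l : List Char) (s v : Int) (c : Char) :
    ((((PySem.List.enumerate l s).map (fun p => (p.2, p.1))).filter
        (fun p => p.1 == c)).map (fun p => p.2)).count v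
      = if s ≤ v ∧ l[(v - s).toNat]? = some c then 1 else 0 := by
  induction l generalizing s with
  | nil => simp
  | cons x xs ih =>
    rw [PySem.List.enumerate_cons]
    by_cases hv : v = s
    · subst hv
      have htail : ((((PySem.List.enumerate xs (v + 1)).map (fun p => (p.2, p.1))).filter
          (fun p => p.1 == c)).map (fun p => p.2)).count v = 0 := by
        rw [ih (v + 1)]; simp
      by_cases hx : x = c
      · subst hx; simp [htail]
      · simp [hx, htail]
    · have hhead : ((((s, x) :: PySem.List.enumerate xs (s + 1)).map (fun p => (p.2, p.1))).filter
          (fun p => p.1 == c)).map (fun p => p.2)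
          = (if x == c then [s] else []) ++ (((PySem.List.enumerate xs (s + 1)).map (fun p => (p.2, p.1))).filter
          (fun p => p.1 == c)).map (fun p => p.2) := by
        by_cases hx : x = c <;> simp [hx]
      rw [hhead, List.count_append, ih (s + 1)]
      have hz : (if x == c then [s] else []).count v = 0 := by
        by_cases hx : x = c <;> simp [hx, List.count_eq_zero, hv]
      rw [hz]
      by_cases hle : s + 1 ≤ v
      · have ht : (v - s).toNat = (v - (s + 1)).toNat + 1 := by omega
        rw [ht]
        simp only [List.getElem?_cons_succ]
        have : (s ≤ v) = (s + 1 ≤ v) := by simp; omega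
        simp [this]
      · have h1 : ¬ (s ≤ v) := by omega
        simp [hle, h1]

theorem pv_pos_getD (as_ : List Char) (c : Char) :
    ((((PySem.List.enumerate as_ 0).foldl
        (fun d p => d.modify p.2 [] (· ++ [p.1])) PySem.Dict.empty)).getD c [])
      = (((PySem.List.enumerate as_ 0).map (fun p => (p.2, p.1))).filter
          (fun p => p.1 == c)).map (fun p => p.2) := by
  have h := PySem.Dict.getD_foldl_modify_append
    ((PySem.List.enumerate as_ 0).map (fun p => (p.2, p.1)))
    (PySem.Dict.empty : PySem.Dict Char (List Int)) c
  rw [List.foldl_map] at h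
  simpa [PySem.Dict.getD_empty] using h

theorem pv_pos_count (as_ : List Char) (c : Char) (v : Int) :
    ((((PySem.List.enumerate as_ 0).foldl
        (fun d p => d.modify p.2 [] (· ++ [p.1])) PySem.Dict.empty)).getD c []).count v
      = if 0 ≤ v ∧ as_[v.toNat]? = some c then 1 else 0 := by
  rw [pv_pos_getD, pv_count_pos]
  norm_num

theorem pvLB_spec (lst : List Int) (j : Int) (hs : lst.Pairwise (· < ·)) :
  ∀ (lo hi : Nat), hi ≤ lst.length →
  (∀ t (ht : t < lst.length), t < lo → lst[t] < j) →
  (∀ t (ht : t < lst.length), hi ≤ t → j ≤ lst[t]) →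
  (∀ t (ht : t < lst.length), t < pvLB lst j lo hi → lst[t] < j) ∧
  (∀ t (ht : t < lst.length), pvLB lst j lo hi ≤ t → j ≤ lst[t]) := by
  have hmono := (List.pairwise_iff_getElem (R := (· < · : Int → Int → Prop)) (l := lst)).1 hs
  intro lo hi
  induction lo, hi using pvLB.induct lst j with
  | case1 lo hi hlh mid hmid ih =>
    intro hhi hbef haft
    have hme : mid = (lo + hi) / 2 := rfl
    have hmlt : mid < lst.length := by omega
    have hmid' : lst[mid] < j := by
      have h := PySem.List.pyGetD_ofNat lst mid 0 hmlt
      rwa [h] at hmid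
    rw [pvLB, if_pos hlh, if_pos hmid]
    exact ih hhi
      (fun t ht h => by
        rcases Nat.lt_succ_iff_lt_or_eq.mp h with h' | h'
        · exact lt_trans (hmono t mid ht hmlt h') hmid'
        · subst h'; exact hmid')
      haft
  | case2 lo hi hlh mid hmid ih =>
    intro hhi hbef haft
    have hme : mid = (lo + hi) / 2 := rfl
    have hmlt : mid < lst.length := by omega
    have hmid' : j ≤ lst[mid] := by
      have h := PySem.List.pyGetD_ofNat lst mid 0 hmlt
      rw [h] at hmid
      exact not_lt.mp hmid
    rw [pvLB, if_pos hlh, if_neg hmid]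
    exact ih (by omega) hbef
      (fun t ht h => by
        rcases Nat.eq_or_lt_of_le h with h' | h'
        · exact hmid'.trans_eq (by simp [h'])
        · exact le_of_lt (lt_of_le_of_lt hmid' (hmono mid t hmlt ht h')))
  | case3 lo hi hlh =>
    intro hhi hbef haft
    rw [pvLB, if_neg hlh]
    exact ⟨hbef, fun t ht h => haft t ht (by omega)⟩

theorem pvWalk_spec (lst : List Int) (j : Int) (hs : lst.Pairwise (· < ·)) :
  ∀ (lo : Nat) (s : List Int),
  (∀ t (ht : t < lst.length), lo ≤ t → j ≤ lst[t]) →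
  ((pvWalk lst j lo s).length = s.length ∧
   ∀ k : Nat, k < s.length →
     PySem.List.pyGetD (pvWalk lst j lo s) (k : Int) 0
       = PySem.List.pyGetD s (k : Int) 0 + (((lst.drop lo).count ((k : Int) + j) : Nat) : Int)) := by
  have hmono := (List.pairwise_iff_getElem (R := (· < · : Int → Int → Prop)) (l := lst)).1 hs
  intro lo s
  induction lo, s using pvWalk.induct lst j with
  | case1 lo s hc ih =>
    intro hge
    obtain ⟨hlo, hlt⟩ := hc
    have hieq : PySem.List.pyGetD lst (lo : Int) 0 = lst[lo] :=
      PySem.List.pyGetD_ofNat lst lo 0 hlo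
    have hjle : j ≤ lst[lo] := hge lo hlo (le_refl lo)
    have h0 : 0 ≤ PySem.List.pyGetD lst (lo : Int) 0 - j := by rw [hieq]; omega
    have hlt' : PySem.List.pyGetD lst (lo : Int) 0 - j < (s.length : Int) := hlt
    have ht : PySem.List.pyGetD lst (lo : Int) 0 - j
        = (((PySem.List.pyGetD lst (lo : Int) 0 - j).toNat : Nat) : Int) := by omega
    have htl : (PySem.List.pyGetD lst (lo : Int) 0 - j).toNat < s.length := by omega
    rw [pvWalk, if_pos ⟨hlo, hlt⟩]
    obtain ⟨ihl, ihg⟩ := ih (fun t ht' h => hge t ht' (by omega))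
    have hslen : (PySem.List.pySetD s (PySem.List.pyGetD lst (lo : Int) 0 - j)
        (PySem.List.pyGetD s (PySem.List.pyGetD lst (lo : Int) 0 - j) 0 + 1)).length = s.length :=
      PySem.List.length_pySetD s _ _
    refine ⟨by rw [ihl, hslen], fun k hk => ?_⟩
    rw [ihg k (by rw [hslen]; exact hk)]
    rw [List.drop_eq_getElem_cons hlo, List.count_cons]
    rw [ht, PySem.List.pyGetD_pySetD_natCast s _ k _ _ htl]
    by_cases hik : k = (PySem.List.pyGetD lst (lo : Int) 0 - j).toNat
    · have heq : lst[lo] = (k : Int) + j := by rw [← hieq]; omega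
      have hidx : PySem.List.pyGetD lst (lo : Int) 0 - j = (k : Int) := by omega
      rw [if_pos hik, hidx, heq]
      simp only [beq_self_eq_true, if_true]
      push_cast
      simp only [Int.toNat_natCast]
      ring
    · have hne : ¬ lst[lo] = (k : Int) + j := by rw [← hieq]; omega
      rw [if_neg hik]
      simp [hne]
  | case2 lo s hc =>
    intro hge
    rw [pvWalk, if_neg hc]
    refine ⟨rfl, fun k hk => ?_⟩
    have hz : (lst.drop lo).count ((k : Int) + j) = 0 := by
      rw [List.count_eq_zero]
      intro hmem
      obtain ⟨u, hu, hue⟩ := List.getElem_of_mem hmem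
      rw [List.getElem_drop] at hue
      by_cases hlo : lo < lst.length
      · have hieq : PySem.List.pyGetD lst (lo : Int) 0 = lst[lo] :=
          PySem.List.pyGetD_ofNat lst lo 0 hlo
        have hbig : ¬ PySem.List.pyGetD lst (lo : Int) 0 - j < (s.length : Int) := by
          intro hcon; exact hc ⟨hlo, hcon⟩
        have hge' : (s.length : Int) ≤ lst[lo] - j := by rw [← hieq]; omega
        have hu' : lo + u < lst.length := by
          rw [List.length_drop] at hu; omega
        have hlu : lst[lo] ≤ lst[lo + u] := by
          rcases Nat.eq_zero_or_pos u with h0 | h0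
          · subst h0; simp
          · exact le_of_lt (hmono lo (lo + u) hlo hu' (by omega))
        omega
      · have : lst.drop lo = [] := List.drop_eq_nil_of_le (by omega)
        rw [this] at hmem
        simp at hmem
    rw [hz]
    simp

theorem pv_step (lst : List Int) (j : Int) (s : List Int) (hs : lst.Pairwise (· < ·)) :
    ((pvWalk lst j (pvLB lst j 0 lst.length) s).length = s.length) ∧
    (∀ k : Nat, k < s.length →
      PySem.List.pyGetD (pvWalk lst j (pvLB lst j 0 lst.length) s) (k : Int) 0
        = PySem.List.pyGetD s (k : Int) 0 + ((lst.count ((k : Int) + j) : Nat) : Int)) := by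
  obtain ⟨hbef, haft⟩ := pvLB_spec lst j hs 0 lst.length (le_refl _)
    (fun t ht h => absurd h (Nat.not_lt_zero t))
    (fun t ht h => absurd ht (by omega))
  obtain ⟨wl, wg⟩ := pvWalk_spec lst j hs (pvLB lst j 0 lst.length) s haft
  refine ⟨wl, fun k hk => ?_⟩
  rw [wg k hk]
  have hcnt : (lst.drop (pvLB lst j 0 lst.length)).count ((k : Int) + j)
      = lst.count ((k : Int) + j) := by
    conv_rhs => rw [← List.take_append_drop (pvLB lst j 0 lst.length) lst]
    rw [List.count_append]
    have hz : (lst.take (pvLB lst j 0 lst.length)).count ((k : Int) + j) = 0 := by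
      rw [List.count_eq_zero]
      intro hmem
      obtain ⟨u, hu, hue⟩ := List.getElem_of_mem hmem
      rw [List.getElem_take] at hue
      rw [List.length_take] at hu
      have hu' : u < lst.length := by omega
      have hul : u < pvLB lst j 0 lst.length := by omega
      have := hbef u hu' hul
      omega
    omega
  rw [hcnt]

theorem pv_pos_sorted (as_ : List Char) (c : Char) :
    ((((PySem.List.enumerate as_ 0).foldl
        (fun d p => d.modify p.2 [] (· ++ [p.1])) PySem.Dict.empty)).getD c []).Pairwise (· < ·) := by
  rw [pv_pos_getD]
  refine List.pairwise_map.mpr ?_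
  refine List.Pairwise.filter _ ?_
  refine List.pairwise_map.mpr ?_
  have := PySem.List.pairwise_lt_enumerate as_ 0
  exact this.imp (fun h => h)

theorem pv_outer (pos : PySem.Dict Char (List Int)) (l : List (Int × Char))
    (hsall : ∀ c, (pos.getD c []).Pairwise (· < ·)) (s : List Int) :
    ((l.foldl (fun s p => pvWalk (pos.getD p.2 []) p.1
        (pvLB (pos.getD p.2 []) p.1 0 (pos.getD p.2 []).length) s) s).length = s.length) ∧
    (∀ k : Nat, k < s.length →
      PySem.List.pyGetD (l.foldl (fun s p => pvWalk (pos.getD p.2 []) p.1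
        (pvLB (pos.getD p.2 []) p.1 0 (pos.getD p.2 []).length) s) s) (k : Int) 0
      = PySem.List.pyGetD s (k : Int) 0
        + (l.map (fun p => (((pos.getD p.2 []).count ((k : Int) + p.1) : Nat) : Int))).sum) := by
  induction l generalizing s with
  | nil => simp
  | cons p rest ih =>
    simp only [List.foldl_cons, List.map_cons, List.sum_cons]
    obtain ⟨il, ig⟩ := pv_step (pos.getD p.2 []) p.1 s (hsall p.2)
    obtain ⟨ohl, ohg⟩ := ih (pvWalk (pos.getD p.2 []) p.1
        (pvLB (pos.getD p.2 []) p.1 0 (pos.getD p.2 []).length) s)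
    refine ⟨by rw [ohl, il], fun k hk => ?_⟩
    rw [ohg k (by rw [il]; exact hk), ig k hk]
    ring


theorem pv_sum_matchCnt (as_ : List Char) (bs' : List Char) (j0 k : Nat) :
    ((PySem.List.enumerate bs' ((j0 : Nat) : Int)).map (fun p =>
        (((((PySem.List.enumerate as_ 0).foldl
            (fun d q => d.modify q.2 [] (· ++ [q.1])) PySem.Dict.empty)).getD p.2 []).count
          ((k : Int) + p.1) : Int))).sum
      = ((List.zip bs' (as_.drop (k + j0))).countP (fun p => p.1 == p.2) : Int) := by
  induction bs' generalizing j0 with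
  | nil => simp
  | cons ch rest ih =>
    rw [PySem.List.enumerate_cons, List.map_cons, List.sum_cons]
    have hc : (((j0 : Nat) : Int) + 1) = (((j0 + 1 : Nat)) : Int) := by push_cast; ring
    by_cases h : k + j0 < as_.length
    · have hdrop : as_.drop (k + j0) = as_[k + j0] :: as_.drop (k + j0 + 1) :=
        List.drop_eq_getElem_cons h
      rw [hdrop]
      have hidx : ((k : Int) + (j0 : Int)).toNat = k + j0 := by omega
      rw [pv_pos_count, hidx]
      have hsome : as_[k + j0]? = some as_[k + j0] := List.getElem?_eq_getElem h
      rw [hc, ih (j0 + 1)]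
      have harr : k + (j0 + 1) = k + j0 + 1 := by omega
      rw [harr]
      by_cases hch : as_[k + j0] = ch
      · simp [hsome, hch]; omega
      · have : ¬ (0 ≤ (k : Int) + (j0 : Int) ∧ as_[k + j0]? = some ch) := by
          simp [hsome]; intro; exact fun hh => hch hh
        rw [if_neg this]
        simp only [List.zip_cons_cons, List.countP_cons]
        have : ¬ ((ch, as_[k + j0]).1 == (ch, as_[k + j0]).2) = true := by
          simpa using fun hh => hch hh.symm
        simp [this]
    · have hdrop : as_.drop (k + j0) = [] := List.drop_eq_nil_of_le (by omega)
      have hdrop2 : as_.drop (k + (j0 + 1)) = [] := List.drop_eq_nil_of_le (by omega)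
      have hidx : ((k : Int) + (j0 : Int)).toNat = k + j0 := by omega
      rw [pv_pos_count, hidx, hdrop]
      have hnone : as_[k + j0]? = none := by
        rw [List.getElem?_eq_none_iff]; omega
      rw [hc, ih (j0 + 1), hdrop2]
      simp [hnone]

theorem pv_B_eq (a b : String) :
    find_top_alignment_index_alt a b =
      pvScan (pvMatchCnt a.toList b.toList) ((a.toList.length + 1) - b.toList.length) := by
  simp only [find_top_alignment_index_alt]
  have ea : a.toList.length = a.length := String.length_toList
  have eb : b.toList.length = b.length := String.length_toList
  set m := (a.toList.length + 1) - b.toList.length with hm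
  have hs0 : PySem.List.pyRepeat [(0 : Int)] (PySem.Str.len a - PySem.Str.len b + 1)
      = List.replicate m 0 := by
    rw [PySem.List.pyRepeat_singleton]
    congr 1
    rw [PySem.Str.len_eq, PySem.Str.len_eq]
    omega
  rw [hs0]
  obtain ⟨hlen, hget⟩ := pv_outer
    ((PySem.List.enumerate a.toList 0).foldl (fun d p => d.modify p.2 [] (· ++ [p.1])) PySem.Dict.empty)
    (PySem.List.enumerate b.toList 0) (fun c => pv_pos_sorted a.toList c) (List.replicate m 0)
  set scores := (PySem.List.enumerate b.toList 0).foldl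
    (fun s p => pvWalk (((PySem.List.enumerate a.toList 0).foldl
        (fun d p => d.modify p.2 [] (· ++ [p.1])) PySem.Dict.empty).getD p.2 []) p.1
      (pvLB (((PySem.List.enumerate a.toList 0).foldl
        (fun d p => d.modify p.2 [] (· ++ [p.1])) PySem.Dict.empty).getD p.2 []) p.1 0
        (((PySem.List.enumerate a.toList 0).foldl
        (fun d p => d.modify p.2 [] (· ++ [p.1])) PySem.Dict.empty).getD p.2 []).length) s)
    (List.replicate m 0) with hscores
  have hslen : scores.length = m := by rw [hlen]; simp
  have hsget : ∀ k : Nat, k < m → PySem.List.pyGetD scores (k : Int) 0 = pvMatchCnt a.toList b.toList k := by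
    intro k hk
    rw [hget k (by simpa using hk)]
    have h0 := pv_sum_matchCnt a.toList b.toList 0 k
    simp only [Nat.cast_zero, Nat.add_zero] at h0
    rw [h0]
    simp [pvMatchCnt]
  rw [PySem.List.enumerate_eq_map_pyRange scores 0, PySem.List.len_eq, hslen,
      PySem.List.pyRange_zero_natCast, List.map_map, List.foldl_map]
  unfold pvScan
  congr 1
  apply PySem.List.foldl_congr_mem
  intro st k hk
  simp only [List.mem_range] at hk
  simp only [Function.comp]
  rw [hsget k hk]

-- ===== VERDICT (by name: the statement is the Claim_ definition above) =====
theorem find_top_alignment_index_spec : Claim_equal_find_top_alignment_index := by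
  intro a b _
  unfold Spec_find_top_alignment_index
  rw [pv_A_eq, pv_B_eq]
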